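-- pv_equiv track=rewrite | github.com/unblemishedgelexy/unblemished-ai | app/services/brain/prompt_builder.py | _strip_inline_meta
-- ===== SOURCE A (Python) =====
-- def _strip_inline_meta(line: str) -> str:
--     lowered = line.lower()
--     cut_index: int | None = None
--     for marker in _INLINE_META_MARKERS:
--         marker_index = lowered.find(marker)
--         if marker_index == -1:
--             continue
--         if cut_index is None or marker_index < cut_index:
--             cut_index = marker_index
--     if cut_index is None:
--         return line
--     if cut_index == 0:
--         return ""
--     return line[:cut_index].rstrip(" -:|;,.\t")
--
-- _INLINE_META_MARKERS: tuple[str, ...] = (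
--     "prompt basis:",
--     "promptversion:",
--     "traceid:",
--     "reasoningmode:",
--     "requestedmode:",
--     "personanamehint:",
--     "styleinstruction:",
--     "strictresponsemode:",
-- )
-- ===== SOURCE B (Python) =====
-- import re
--
-- _INLINE_META_MARKERS: tuple[str, ...] = (
--     "prompt basis:",
--     "promptversion:",
--     "traceid:",
--     "reasoningmode:",
--     "requestedmode:",
--     "personanamehint:",
--     "styleinstruction:",
--     "strictresponsemode:",
-- )
--
-- # One case-insensitive automaton scan for the leftmost marker occurrence
-- # (markers are plain text: no regex metacharacters, no escaping needed).
-- _META_RE = re.compile("|".join(_INLINE_META_MARKERS), re.IGNORECASE)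
--
--
-- def _strip_inline_meta(line: str) -> str:
--     m = _META_RE.search(line)
--     if m is None:
--         return line
--     cut = m.start()
--     if cut == 0:
--         return ""
--     return line[:cut].rstrip(" -:|;,.\t")
-- ===== Notes on version B (the rewrite author's own statement) =====
-- stated objective: idiomatic
-- what changed: Replaces the eight independent str.find passes plus running-minimum bookkeeping by a single compiled case-insensitive regex alternation searched once; the leftmost match start replaces the min over per-marker finds.
import Mathlib
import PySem

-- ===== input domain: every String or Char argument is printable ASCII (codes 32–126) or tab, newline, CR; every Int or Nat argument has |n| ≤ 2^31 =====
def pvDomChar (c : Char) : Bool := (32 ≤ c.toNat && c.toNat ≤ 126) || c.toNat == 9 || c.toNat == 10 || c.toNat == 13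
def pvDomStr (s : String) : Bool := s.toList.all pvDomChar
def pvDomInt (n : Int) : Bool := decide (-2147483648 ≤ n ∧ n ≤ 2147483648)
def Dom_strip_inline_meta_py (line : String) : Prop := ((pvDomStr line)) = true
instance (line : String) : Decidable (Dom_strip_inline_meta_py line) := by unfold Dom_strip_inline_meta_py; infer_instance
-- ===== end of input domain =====

-- B replaces the eight-pass min-over-str.find loop by a single left-to-right
-- case-insensitive scan for the leftmost marker (in Python, one compiled regex
-- search); objective: idiomatic/alternative.

-- shared module constant: the marker tuple
def metaMarkers : List String :=
  ["prompt basis:", "promptversion:", "traceid:", "reasoningmode:",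
   "requestedmode:", "personanamehint:", "styleinstruction:", "strictresponsemode:"]

-- shared exact hand-port of str.rstrip(" -:|;,.\t") (PySem has no rstrip-with-chars):
-- drop trailing characters belonging to the set.
def rstripSet : List Char := [' ', '-', ':', '|', ';', ',', '.', '\t']

def rstripMeta (cs : List Char) : List Char :=
  (cs.reverse.dropWhile (fun c => rstripSet.contains c)).reverse

-- ===== PORT A =====
def strip_inline_meta_py (line : String) : String :=
  let lowered := PySem.Str.lower line
  let cut : Option Int := metaMarkers.foldl
    (fun (cut : Option Int) marker =>
      let markerIndex := PySem.Str.find lowered marker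
      if markerIndex = -1 then cut
      else match cut with
        | none => some markerIndex
        | some c => if markerIndex < c then some markerIndex else some c)
    none
  match cut with
  | none => line
  | some c =>
    if c = 0 then ""
    else String.ofList (rstripMeta (PySem.Str.slice line none (some c)).toList)

-- ===== PORT B =====
-- case-insensitive plain-text prefix test (what re.IGNORECASE does on ASCII)
def prefixICase : List Char → List Char → Bool
  | [], _ => true
  | _ :: _, [] => false
  | p :: ps, c :: cs => p == PySem.Chars.lowerChar c && prefixICase ps cs

-- start index of the leftmost match of the alternation, i.e. _META_RE.search(line).start()
def reSearchStart : List Char → Option Nat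
  | [] => none
  | c :: rest =>
    if metaMarkers.any (fun m => prefixICase m.toList (c :: rest)) then some 0
    else (reSearchStart rest).map (· + 1)

def strip_inline_meta_py_alt (line : String) : String :=
  match reSearchStart line.toList with
  | none => line
  | some 0 => ""
  | some cut => String.ofList (rstripMeta (line.toList.take cut))

-- ===== PRECONDITION & SPEC =====
def Spec_strip_inline_meta_py (line : String) (out : String) : Prop := out = strip_inline_meta_py_alt line
instance (line : String) (out : String) : Decidable (Spec_strip_inline_meta_py line out) := by unfold Spec_strip_inline_meta_py; infer_instance

-- ===== CLAIM (what is proved, stated in full; the proofs are below) =====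
def Claim_equal_strip_inline_meta_py : Prop := ∀ (line : String), Dom_strip_inline_meta_py line → Spec_strip_inline_meta_py line (strip_inline_meta_py line)

-- ===== LEMMAS AND PROOFS =====

-- case-insensitive prefix test = plain prefix test on the lowered text
theorem prefixICase_iff (p cs : List Char) :
    prefixICase p cs = true ↔ p <+: PySem.Chars.lower cs := by
  induction p generalizing cs with
  | nil => simp [prefixICase]
  | cons a ps ih =>
    cases cs with
    | nil => simp [prefixICase, PySem.Chars.lower]
    | cons c rest =>
      simp [prefixICase, PySem.Chars.lower, ih, List.cons_prefix_cons]

-- the per-position match predicate on the lowered text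
def matchAt (low : List Char) (i : Nat) : Prop :=
  ∃ m ∈ metaMarkers, m.toList <+: low.drop i

theorem matchAt_zero_iff_any (cs : List Char) :
    matchAt (PySem.Chars.lower cs) 0 ↔
      (metaMarkers.any (fun m => prefixICase m.toList cs)) = true := by
  simp [matchAt, List.any_eq_true, prefixICase_iff]

theorem matchAt_succ (c : Char) (rest : List Char) (i : Nat) :
    matchAt (PySem.Chars.lower (c :: rest)) (i + 1) ↔ matchAt (PySem.Chars.lower rest) i := by
  simp [matchAt, PySem.Chars.lower]

theorem reSearchStart_none_iff (cs : List Char) :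
    reSearchStart cs = none ↔ ∀ i, ¬ matchAt (PySem.Chars.lower cs) i := by
  induction cs with
  | nil =>
    simp only [reSearchStart, true_iff]
    intro i h
    obtain ⟨m, hm, hp⟩ := h
    have : m.toList = [] := List.prefix_nil.mp (by simpa [PySem.Chars.lower] using hp)
    fin_cases hm <;> simp_all
  | cons c rest ih =>
    by_cases h0 : (metaMarkers.any (fun m => prefixICase m.toList (c :: rest))) = true
    · simp only [reSearchStart, if_pos h0]
      constructor
      · intro h; cases h
      · intro h; exact absurd ((matchAt_zero_iff_any (c :: rest)).mpr h0) (h 0)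
    · simp only [reSearchStart, if_neg h0, Option.map_eq_none_iff, ih]
      constructor
      · intro h i
        cases i with
        | zero => exact fun hm => h0 ((matchAt_zero_iff_any (c :: rest)).mp hm)
        | succ j => exact fun hm => h j ((matchAt_succ c rest j).mp hm)
      · intro h i hm
        exact h (i + 1) ((matchAt_succ c rest i).mpr hm)

theorem reSearchStart_some_of (cs : List Char) (k : Nat)
    (hk : matchAt (PySem.Chars.lower cs) k)
    (hmin : ∀ i < k, ¬ matchAt (PySem.Chars.lower cs) i) :
    reSearchStart cs = some k := by
  induction cs generalizing k with
  | nil =>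
    exfalso
    obtain ⟨m, hm, hp⟩ := hk
    have : m.toList = [] := List.prefix_nil.mp (by simpa [PySem.Chars.lower] using hp)
    fin_cases hm <;> simp_all
  | cons c rest ih =>
    by_cases h0 : (metaMarkers.any (fun m => prefixICase m.toList (c :: rest))) = true
    · have hk0 : k = 0 := by
        by_contra hne
        exact hmin 0 (Nat.pos_of_ne_zero hne) ((matchAt_zero_iff_any (c :: rest)).mpr h0)
      simp only [hk0, reSearchStart, if_pos h0]
    · cases k with
      | zero => exact absurd ((matchAt_zero_iff_any (c :: rest)).mp hk) h0
      | succ j =>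
        have hrec : reSearchStart rest = some j := by
          refine ih j ((matchAt_succ c rest j).mp hk) ?_
          intro i hij hm
          exact hmin (i + 1) (by omega) ((matchAt_succ c rest i).mpr hm)
        simp only [reSearchStart, if_neg h0, hrec, Option.map_some]

-- A's fold step, written with the list-level find (the port's step reduces to it)
def aStep (low : List Char) (cut : Option Int) (marker : String) : Option Int :=
  let markerIndex := PySem.Chars.find low marker.toList
  if markerIndex = -1 then cut
  else match cut with
    | none => some markerIndex
    | some c => if markerIndex < c then some markerIndex else some c

theorem foldA_none_iff (low : List Char) (ms : List String) (acc : Option Int) :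
    ms.foldl (aStep low) acc = none ↔
      acc = none ∧ ∀ m ∈ ms, PySem.Chars.find low m.toList = -1 := by
  induction ms generalizing acc with
  | nil => simp
  | cons m rest ih =>
    simp only [List.foldl_cons, ih, List.mem_cons]
    constructor
    · rintro ⟨hstep, hall⟩
      by_cases hfind : PySem.Chars.find low m.toList = -1
      · simp only [aStep, hfind, if_true] at hstep
        exact ⟨hstep, fun x hx => hx.elim (fun h => h ▸ hfind) (hall x)⟩
      · exfalso
        cases acc with
        | none => simp [aStep, hfind] at hstep
        | some a =>
          simp only [aStep, hfind, if_false] at hstep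
          split_ifs at hstep
    · rintro ⟨hacc, hall⟩
      have hfind := hall m (Or.inl rfl)
      refine ⟨?_, fun x hx => hall x (Or.inr hx)⟩
      simp [aStep, hfind, hacc]

theorem foldA_some (low : List Char) (ms : List String) (acc : Option Int) (c : Int)
    (h : ms.foldl (aStep low) acc = some c) :
    (acc = some c ∨ ∃ m ∈ ms, PySem.Chars.find low m.toList = c ∧ ¬ c = -1) ∧
    (∀ a, acc = some a → c ≤ a) ∧
    (∀ m ∈ ms, ¬ PySem.Chars.find low m.toList = -1 → c ≤ PySem.Chars.find low m.toList) := by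
  induction ms generalizing acc with
  | nil =>
    simp only [List.foldl_nil] at h
    refine ⟨Or.inl h, fun a ha => ?_, by simp⟩
    rw [h] at ha
    exact le_of_eq (Option.some.inj ha)
  | cons m rest ih =>
    simp only [List.foldl_cons] at h
    obtain ⟨h1, h2, h3⟩ := ih (aStep low acc m) h
    by_cases hfind : PySem.Chars.find low m.toList = -1
    · have hstep : aStep low acc m = acc := by simp [aStep, hfind]
      rw [hstep] at h1 h2
      refine ⟨h1.imp id (fun hex => ?_), h2, ?_⟩
      · obtain ⟨x, hx, hfx⟩ := hex
        exact ⟨x, List.mem_cons_of_mem _ hx, hfx⟩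
      · intro x hx hfx
        rcases List.mem_cons.mp hx with rfl | hx'
        · exact absurd hfind hfx
        · exact h3 x hx' hfx
    · cases acc with
      | none =>
        have hstep : aStep low none m = some (PySem.Chars.find low m.toList) := by
          simp [aStep, hfind]
        rw [hstep] at h1 h2
        have hcm : c ≤ PySem.Chars.find low m.toList := h2 _ rfl
        refine ⟨?_, fun a ha => absurd ha (by simp), ?_⟩
        · rcases h1 with heq | hex
          · have hfc : PySem.Chars.find low m.toList = c := Option.some.inj heq
            exact Or.inr ⟨m, List.mem_cons_self, hfc, hfc ▸ hfind⟩
          · obtain ⟨x, hx, hfx⟩ := hex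
            exact Or.inr ⟨x, List.mem_cons_of_mem _ hx, hfx⟩
        · intro x hx hfx
          rcases List.mem_cons.mp hx with rfl | hx'
          · exact hcm
          · exact h3 x hx' hfx
      | some a =>
        have hstep : aStep low (some a) m =
            some (if PySem.Chars.find low m.toList < a then PySem.Chars.find low m.toList else a) := by
          simp only [aStep, if_neg hfind]
          split_ifs <;> rfl
        rw [hstep] at h1 h2
        have hcb : c ≤ if PySem.Chars.find low m.toList < a then PySem.Chars.find low m.toList else a :=
          h2 _ rfl
        have hba : (if PySem.Chars.find low m.toList < a then PySem.Chars.find low m.toList else a) ≤ a := by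
          split_ifs with hlt; omega; omega
        have hbf : (if PySem.Chars.find low m.toList < a then PySem.Chars.find low m.toList else a) ≤
            PySem.Chars.find low m.toList := by
          split_ifs with hlt; omega; omega
        refine ⟨?_, fun a' ha' => ?_, ?_⟩
        · rcases h1 with heq | hex
          · have hbc : (if PySem.Chars.find low m.toList < a then PySem.Chars.find low m.toList else a) = c :=
              Option.some.inj heq
            by_cases hlt : PySem.Chars.find low m.toList < a
            · rw [if_pos hlt] at hbc
              exact Or.inr ⟨m, List.mem_cons_self, hbc, hbc ▸ hfind⟩
            · rw [if_neg hlt] at hbc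
              exact Or.inl (by rw [hbc])
          · obtain ⟨x, hx, hfx⟩ := hex
            exact Or.inr ⟨x, List.mem_cons_of_mem _ hx, hfx⟩
        · have : a = a' := Option.some.inj ha'
          omega
        · intro x hx hfx
          rcases List.mem_cons.mp hx with rfl | hx'
          · omega
          · exact h3 x hx' hfx

-- ===== VERDICT (by name: the statement is the Claim_ definition above) =====
theorem strip_inline_meta_py_spec : Claim_equal_strip_inline_meta_py := by
  intro line _
  unfold Spec_strip_inline_meta_py strip_inline_meta_py strip_inline_meta_py_alt
  have hstepeq : (fun (cut : Option Int) marker =>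
      let markerIndex := PySem.Str.find (PySem.Str.lower line) marker
      if markerIndex = -1 then cut
      else match cut with
        | none => some markerIndex
        | some c => if markerIndex < c then some markerIndex else some c) =
      aStep (PySem.Chars.lower line.toList) := by
    funext cut marker
    simp only [aStep, PySem.Str.find_eq, PySem.Str.toList_lower]
  simp only [hstepeq]
  rcases h : metaMarkers.foldl (aStep (PySem.Chars.lower line.toList)) none with _ | c
  · have hall := ((foldA_none_iff _ _ _).mp h).2
    have hre : reSearchStart line.toList = none := by
      rw [reSearchStart_none_iff]
      rintro i ⟨m, hm, hp⟩
      have hin : PySem.Chars.isIn m.toList (PySem.Chars.lower line.toList) = true :=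
        (PySem.Chars.exists_prefix_drop_iff_isIn _ _).mp ⟨i, hp⟩
      have : PySem.Chars.find (PySem.Chars.lower line.toList) m.toList ≠ -1 :=
        (PySem.Chars.find_ne_neg_one_iff _ _).mpr ((PySem.Chars.isIn_iff_infix _ _).mp hin)
      exact this (hall m hm)
    rw [hre]
  · obtain ⟨h1, _, h3⟩ := foldA_some _ _ _ _ h
    rcases h1 with heq | ⟨m₀, hm₀, hf₀, hne₀⟩
    · cases heq
    have hc0 : 0 ≤ c := by
      have := PySem.Chars.neg_one_le_find (PySem.Chars.lower line.toList) m₀.toList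
      omega
    have hmatch : matchAt (PySem.Chars.lower line.toList) c.toNat := by
      refine ⟨m₀, hm₀, ?_⟩
      have := (PySem.Chars.find_spec (s := PySem.Chars.lower line.toList) (sub := m₀.toList)
        (by rw [hf₀]; exact hc0)).1
      rwa [hf₀] at this
    have hmin : ∀ i < c.toNat, ¬ matchAt (PySem.Chars.lower line.toList) i := by
      rintro i hi ⟨m, hm, hp⟩
      have hin : PySem.Chars.isIn m.toList (PySem.Chars.lower line.toList) = true :=
        (PySem.Chars.exists_prefix_drop_iff_isIn _ _).mp ⟨i, hp⟩
      have hne : PySem.Chars.find (PySem.Chars.lower line.toList) m.toList ≠ -1 :=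
        (PySem.Chars.find_ne_neg_one_iff _ _).mpr ((PySem.Chars.isIn_iff_infix _ _).mp hin)
      have hle := h3 m hm hne
      have hpos : 0 ≤ PySem.Chars.find (PySem.Chars.lower line.toList) m.toList := by
        have := PySem.Chars.neg_one_le_find (PySem.Chars.lower line.toList) m.toList
        omega
      have hfirst := (PySem.Chars.find_spec (s := PySem.Chars.lower line.toList)
        (sub := m.toList) hpos).2
      have hge : (PySem.Chars.find (PySem.Chars.lower line.toList) m.toList).toNat ≤ i := by
        by_contra hlt
        exact hfirst i (by omega) hp
      have : c.toNat ≤ (PySem.Chars.find (PySem.Chars.lower line.toList) m.toList).toNat := by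
        omega
      omega
    have hre : reSearchStart line.toList = some c.toNat :=
      reSearchStart_some_of _ _ hmatch hmin
    rw [hre]
    rcases hn : c.toNat with _ | n
    · have : c = 0 := by omega
      simp [this]
    · have hcne : ¬ c = 0 := by omega
      have hslice : (PySem.Str.slice line none (some c)).toList = line.toList.take c.toNat := by
        simp [PySem.Str.toList_slice, PySem.Chars.slice_eq_listSlice, PySem.List.slice_to _ hc0]
      simp [hcne, hslice, hn]
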